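-- pv_equiv track=rewrite | github.com/anatshafir1/CRISPys | Amplicon_construction/Get_SNPs.py | create_snps_dict
-- ===== SOURCE A (Python) =====
-- from typing import List, Dict, Tuple
--
-- def create_snps_dict(fasta_sequences_lst: List, distinct_alleles_num: int) -> Dict[int, Tuple[str]]:
--     """
--
--     :param fasta_sequences_lst:
--     :param distinct_alleles_num:
--     :return:
--     """
--     snps_dict = {}
--     only_sequences_lst = [fasta_sequences_lst[i][1] for i in range(distinct_alleles_num)]
--     only_sequences_zip = zip(*only_sequences_lst)
--     for index, locus in enumerate(only_sequences_zip):
--         if not all(locus[0] == nucleotide for nucleotide in locus):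
--             snps_dict[index] = locus  # the indices of nucleotides in the tuple are the alleles numbers
--
--     return snps_dict
-- ===== SOURCE B (Python) =====
-- def create_snps_dict(fasta_sequences_lst, distinct_alleles_num):
--     seqs = [fasta_sequences_lst[i][1] for i in range(distinct_alleles_num)]
--     common_len = min((len(s) for s in seqs), default=0)
--     reference = seqs[0] if seqs else ""
--     variant_positions = set()
--     for other in seqs[1:]:
--         for p in range(common_len):
--             if other[p] != reference[p]:
--                 variant_positions.add(p)
--     return {p: tuple(s[p] for s in seqs) for p in sorted(variant_positions)}
-- ===== Notes on version B (the rewrite author's own statement) =====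
-- stated objective: alternative
-- what changed: Replaces the column-major zip(*seqs) pass with an all-equal test per column by a per-allele mismatch sweep against the first sequence as reference, collecting variant positions in a set up to the minimum sequence length, then rebuilding each variant column in allele order from sorted positions.
import Mathlib
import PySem

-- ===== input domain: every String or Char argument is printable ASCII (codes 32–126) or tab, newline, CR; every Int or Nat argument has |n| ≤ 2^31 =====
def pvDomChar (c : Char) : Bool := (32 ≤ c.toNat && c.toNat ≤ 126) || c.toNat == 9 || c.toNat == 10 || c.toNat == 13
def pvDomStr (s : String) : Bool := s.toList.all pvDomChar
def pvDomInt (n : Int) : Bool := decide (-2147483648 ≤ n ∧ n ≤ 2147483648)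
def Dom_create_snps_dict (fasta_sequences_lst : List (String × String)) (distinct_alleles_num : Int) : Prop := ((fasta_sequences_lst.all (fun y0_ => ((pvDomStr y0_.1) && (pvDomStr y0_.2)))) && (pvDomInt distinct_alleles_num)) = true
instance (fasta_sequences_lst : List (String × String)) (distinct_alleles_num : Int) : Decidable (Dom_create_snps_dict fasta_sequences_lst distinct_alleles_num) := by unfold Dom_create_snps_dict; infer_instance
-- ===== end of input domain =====

-- B replaces A's column-major zip + all-equal test by a per-allele mismatch sweep against the
-- first sequence, maintaining a set of variant positions and rebuilding the columns at the end
-- (objective: alternative decomposition, same cost).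

-- ===== PORT A =====

-- zip(*lists) over strings (as char lists): the columns, up to the minimum length; zip() of no
-- iterables is empty.  Exact hand port of CPython's variadic zip on character sequences
-- (the getD default is never reached: p is below every length).
def pyZipChars (ls : List (List Char)) : List (List Char) :=
  match ls with
  | [] => []
  | s :: rest =>
    let L := rest.foldl (fun m t => min m t.length) s.length
    (List.range L).map (fun p => (s :: rest).map (fun t => t.getD p ' '))

def create_snps_dict (fasta_sequences_lst : List (String × String)) (distinct_alleles_num : Int) : List (Int × List String) :=
  let only_sequences_lst := (PySem.List.pyRange 0 distinct_alleles_num 1).map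
      (fun i => (PySem.List.pyGetD fasta_sequences_lst i ("", "")).2.toList)
  let only_sequences_zip := pyZipChars only_sequences_lst
  -- locus[0]: locus is a column of a nonempty list of sequences, hence nonempty; headD is exact
  let snps_dict := (PySem.List.enumerate only_sequences_zip 0).foldl
      (fun (snps : PySem.Dict Int (List String)) il =>
        if !(il.2.all (fun nucleotide => (il.2.headD ' ') == nucleotide)) then
          snps.insert il.1 (il.2.map (fun c => String.mk [c]))
        else snps)
      PySem.Dict.empty
  snps_dict.items

-- ===== PORT B =====

def create_snps_dict_alt (fasta_sequences_lst : List (String × String)) (distinct_alleles_num : Int) : List (Int × List String) :=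
  let seqs := (PySem.List.pyRange 0 distinct_alleles_num 1).map
      (fun i => (PySem.List.pyGetD fasta_sequences_lst i ("", "")).2.toList)
  let common_len : Int := ((seqs.map (fun s => (s.length : Int))).min?).getD 0
  let reference := seqs.headD []
  let variant_positions : PySem.Set Int :=
    (seqs.drop 1).foldl (fun vs other =>
      (PySem.List.pyRange 0 common_len 1).foldl (fun vs p =>
        if PySem.List.pyGetD other p ' ' != PySem.List.pyGetD reference p ' ' then
          PySem.Set.add vs p
        else vs) vs)
      PySem.Set.empty
  (PySem.List.sorted variant_positions (fun x => x) false).map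
    (fun p => (p, seqs.map (fun s => String.mk [PySem.List.pyGetD s p ' '])))

-- ===== PRECONDITION & SPEC =====

-- Pre_ excludes exactly the inputs where the Python A raises IndexError
-- (distinct_alleles_num > len(fasta_sequences_lst)); B raises there too.
def Pre_create_snps_dict (fasta_sequences_lst : List (String × String)) (distinct_alleles_num : Int) : Prop :=
  distinct_alleles_num ≤ fasta_sequences_lst.length

instance (fasta_sequences_lst : List (String × String)) (distinct_alleles_num : Int) : Decidable (Pre_create_snps_dict fasta_sequences_lst distinct_alleles_num) := by unfold Pre_create_snps_dict; infer_instance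

def pvWitness_create_snps_dict : (List (String × String)) × Int := ([("a1", "ACGT"), ("a2", "AGGT")], 2)

def Spec_create_snps_dict (fasta_sequences_lst : List (String × String)) (distinct_alleles_num : Int) (out : List (Int × List String)) : Prop := out = create_snps_dict_alt fasta_sequences_lst distinct_alleles_num
instance (fasta_sequences_lst : List (String × String)) (distinct_alleles_num : Int) (out : List (Int × List String)) : Decidable (Spec_create_snps_dict fasta_sequences_lst distinct_alleles_num out) := by unfold Spec_create_snps_dict; infer_instance

-- ===== CLAIM (what is proved, stated in full; the proofs are below) =====
def Claim_equal_create_snps_dict : Prop := ∀ (fasta_sequences_lst : List (String × String)) (distinct_alleles_num : Int), Dom_create_snps_dict fasta_sequences_lst distinct_alleles_num → Pre_create_snps_dict fasta_sequences_lst distinct_alleles_num → Spec_create_snps_dict fasta_sequences_lst distinct_alleles_num (create_snps_dict fasta_sequences_lst distinct_alleles_num)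

-- ===== LEMMAS AND PROOFS =====

theorem pv_enum_map_range {α : Type} (f : Nat → α) (L : Nat) :
    PySem.List.enumerate ((List.range L).map f) 0
      = (List.range L).map (fun (p : Nat) => ((p : Int), f p)) := by
  induction L with
  | zero => simp
  | succ n ih =>
    rw [List.range_succ, List.map_append, List.map_append, PySem.List.enumerate_append, ih]
    simp [PySem.List.enumerate_cons, PySem.List.enumerate_nil]

theorem pv_foldl_min_cast (rest : List (List Char)) : ∀ (a : Nat),
    (rest.map (fun t => (t.length : Int))).foldl min ((a : Nat) : Int)
      = ((rest.foldl (fun m t => min m t.length) a : Nat) : Int) := by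
  induction rest with
  | nil => intro a; simp
  | cons t ts ih =>
    intro a
    simp only [List.map_cons, List.foldl_cons]
    rw [← Nat.cast_min, ih]

theorem pv_minlen (s : List Char) (rest : List (List Char)) :
    (((s :: rest).map (fun t => (t.length : Int))).min?).getD 0
      = ((rest.foldl (fun m t => min m t.length) s.length : Nat) : Int) := by
  rw [List.map_cons, List.min?_cons']
  simp only [Option.getD_some]
  exact pv_foldl_min_cast rest s.length

theorem pv_foldl_add_nodup {α : Type} [BEq α] [LawfulBEq α] (l : List α) :
    ∀ s : List α, s.Nodup → (l.foldl (fun s b => PySem.Set.add s b) s).Nodup := by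
  induction l with
  | nil => intro s h; exact h
  | cons x xs ih => intro s h; exact ih _ (PySem.Set.nodup_add _ _ h)

theorem pv_variants_nodup (ref : List Char) (L : Int) (others : List (List Char)) :
    ∀ vs : List Int, vs.Nodup →
      (others.foldl (fun vs other =>
        (PySem.List.pyRange 0 L 1).foldl (fun vs p =>
          if PySem.List.pyGetD other p ' ' != PySem.List.pyGetD ref p ' ' then
            PySem.Set.add vs p
          else vs) vs) vs).Nodup := by
  induction others with
  | nil => intro vs h; exact h
  | cons o os ih =>
    intro vs h
    simp only [List.foldl_cons]
    refine ih _ ?_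
    rw [PySem.List.foldl_if_eq_foldl_filter]
    exact pv_foldl_add_nodup _ _ h

theorem pv_variants_mem (ref : List Char) (L : Int) (others : List (List Char)) (x : Int) :
    ∀ vs : List Int,
      (x ∈ others.foldl (fun vs other =>
        (PySem.List.pyRange 0 L 1).foldl (fun vs p =>
          if PySem.List.pyGetD other p ' ' != PySem.List.pyGetD ref p ' ' then
            PySem.Set.add vs p
          else vs) vs) vs)
      ↔ x ∈ vs ∨ ∃ o ∈ others, (0 ≤ x ∧ x < L) ∧
          (PySem.List.pyGetD o x ' ' != PySem.List.pyGetD ref x ' ') = true := by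
  induction others with
  | nil => intro vs; simp
  | cons o os ih =>
    intro vs
    rw [List.foldl_cons, ih, PySem.List.foldl_if_eq_foldl_filter,
      PySem.Set.mem_foldl_add (f := fun (b : Int) => b)]
    simp only [List.mem_filter, PySem.List.mem_pyRange_one, List.mem_cons]
    constructor
    · rintro ((h | ⟨b, ⟨⟨hb1, hb2⟩, hcond⟩, rfl⟩) | ⟨o', ho', h2⟩)
      · exact Or.inl h
      · exact Or.inr ⟨o, Or.inl rfl, ⟨hb1, hb2⟩, hcond⟩
      · exact Or.inr ⟨o', Or.inr ho', h2⟩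
    · rintro (h | ⟨o', (rfl | ho'), hx, hcond⟩)
      · exact Or.inl (Or.inl h)
      · exact Or.inl (Or.inr ⟨x, ⟨⟨hx.1, hx.2⟩, hcond⟩, rfl⟩)
      · exact Or.inr ⟨o', ho', hx, hcond⟩

theorem pv_pred (s : List Char) (rest : List (List Char)) (p : Nat) :
    (!(((s :: rest).map (fun t => t.getD p ' ')).all
        (fun n => (((s :: rest).map (fun t => t.getD p ' ')).headD ' ') == n)))
      = rest.any (fun o => o.getD p ' ' != s.getD p ' ') := by
  have hhead : ((s :: rest).map (fun t => t.getD p ' ')).headD ' ' = s.getD p ' ' := rfl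
  rw [Bool.eq_iff_iff, Bool.not_eq_true']
  constructor
  · intro hall
    rw [Bool.eq_false_iff] at hall
    by_contra hany
    apply hall
    rw [List.all_eq_true]
    intro n hn
    obtain ⟨t, ht, rfl⟩ := List.mem_map.mp hn
    rw [hhead, beq_iff_eq]
    rcases List.mem_cons.mp ht with rfl | ht'
    · rfl
    · by_contra hne
      apply hany
      rw [List.any_eq_true]
      exact ⟨t, ht', bne_iff_ne.mpr (fun e => hne e.symm)⟩
  · intro hany
    obtain ⟨t, ht, hcond⟩ := List.any_eq_true.mp hany
    rw [Bool.eq_false_iff]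
    intro hall
    rw [List.all_eq_true] at hall
    have h2 := hall (t.getD p ' ') (List.mem_map.mpr ⟨t, List.mem_cons_of_mem _ ht, rfl⟩)
    rw [hhead, beq_iff_eq] at h2
    rw [bne_iff_ne] at hcond
    exact hcond h2.symm

theorem pv_A_loop (f : Nat → List Char) (pred : List Char → Bool) :
    ∀ (l : List Nat) (d : PySem.Dict Int (List String)),
      (∀ p ∈ l, d.contains (p : Int) = false) → ((l.map (fun (p : Nat) => (p : Int))).Nodup) →
      ((l.map (fun (p : Nat) => ((p : Int), f p))).foldl
        (fun (snps : PySem.Dict Int (List String)) il =>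
          if pred il.2 then snps.insert il.1 (il.2.map (fun c => String.mk [c])) else snps) d).items
      = d.items ++ (l.filter (fun p => pred (f p))).map
          (fun (p : Nat) => ((p : Int), (f p).map (fun c => String.mk [c]))) := by
  intro l
  induction l with
  | nil => intro d _ _; simp
  | cons p ps ih =>
    intro d hfresh hnd
    rw [List.map_cons, List.nodup_cons] at hnd
    simp only [List.map_cons, List.foldl_cons, List.filter_cons]
    by_cases hp : pred (f p)
    · rw [if_pos hp, if_pos hp]
      rw [ih (d.insert (p : Int) ((f p).map (fun c => String.mk [c])))
        (by
          intro q hq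
          rw [PySem.Dict.contains_insert]
          have hqp : ((q : Int) == (p : Int)) = false := by
            refine beq_eq_false_iff_ne.mpr ?_
            intro e
            exact hnd.1 (e ▸ List.mem_map_of_mem hq)
          rw [hqp, hfresh q (List.mem_cons_of_mem _ hq)]
          rfl)
        hnd.2]
      rw [PySem.Dict.items_insert_of_not_contains _ _ (hfresh p List.mem_cons_self)]
      simp [List.append_assoc]
    · rw [if_neg hp, if_neg hp]
      exact ih d (fun q hq => hfresh q (List.mem_cons_of_mem _ hq)) hnd.2

theorem pv_core (seqs : List (List Char)) :
    ((PySem.List.enumerate (pyZipChars seqs) 0).foldl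
      (fun (snps : PySem.Dict Int (List String)) il =>
        if !(il.2.all (fun nucleotide => (il.2.headD ' ') == nucleotide)) then
          snps.insert il.1 (il.2.map (fun c => String.mk [c]))
        else snps)
      PySem.Dict.empty).items
    =
    (PySem.List.sorted
      ((seqs.drop 1).foldl (fun vs other =>
        (PySem.List.pyRange 0 (((seqs.map (fun s => (s.length : Int))).min?).getD 0) 1).foldl
          (fun vs p =>
            if PySem.List.pyGetD other p ' ' != PySem.List.pyGetD (seqs.headD []) p ' ' then
              PySem.Set.add vs p
            else vs) vs)
        PySem.Set.empty)
      (fun x => x) false).map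
      (fun p => (p, seqs.map (fun s => String.mk [PySem.List.pyGetD s p ' ']))) := by
  cases seqs with
  | nil => decide
  | cons s rest =>
    have hzip : pyZipChars (s :: rest)
        = (List.range (rest.foldl (fun m t => min m t.length) s.length)).map
            (fun p => (s :: rest).map (fun t => t.getD p ' ')) := rfl
    rw [hzip, pv_enum_map_range, pv_minlen]
    rw [pv_A_loop (fun p => (s :: rest).map (fun t => t.getD p ' '))
        (fun locus => !(locus.all (fun nucleotide => (locus.headD ' ') == nucleotide)))
        (List.range (rest.foldl (fun m t => min m t.length) s.length))
        PySem.Dict.empty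
        (fun _ _ => PySem.Dict.contains_empty _)
        (List.Nodup.map Nat.cast_injective List.nodup_range)]
    generalize hL : rest.foldl (fun m t => min m t.length) s.length = L
    simp only [List.headD_cons, List.drop_succ_cons, List.drop_zero]
    -- characterize the sorted variant set
    have hvarnodup := pv_variants_nodup s ((L : Nat) : Int) rest PySem.Set.empty List.nodup_nil
    have hysnodup :
        (((List.range L).filter (fun p => rest.any (fun o => o.getD p ' ' != s.getD p ' '))).map
          (fun (p : Nat) => (p : Int))).Nodup :=
      List.Nodup.map Nat.cast_injective (List.Nodup.filter _ List.nodup_range)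
    have hyspair :
        ((((List.range L).filter (fun p => rest.any (fun o => o.getD p ' ' != s.getD p ' '))).map
          (fun (p : Nat) => (p : Int))).Pairwise (· < ·)) := by
      refine List.Pairwise.map _ (fun a b hab => ?_) (List.Pairwise.filter _ (List.pairwise_lt_range))
      exact_mod_cast hab
    have hperm :
        (((List.range L).filter (fun p => rest.any (fun o => o.getD p ' ' != s.getD p ' '))).map
          (fun (p : Nat) => (p : Int))).Perm
        (rest.foldl (fun vs other =>
          (PySem.List.pyRange 0 ((L : Nat) : Int) 1).foldl
            (fun vs p =>
              if PySem.List.pyGetD other p ' ' != PySem.List.pyGetD s p ' ' then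
                PySem.Set.add vs p
              else vs) vs)
          PySem.Set.empty) := by
      rw [List.perm_ext_iff_of_nodup hysnodup hvarnodup]
      intro x
      rw [pv_variants_mem s ((L : Nat) : Int) rest x PySem.Set.empty]
      simp only [List.mem_map, List.mem_filter, List.mem_range]
      constructor
      · rintro ⟨p, ⟨⟨hpL, hpq⟩, rfl⟩⟩
        obtain ⟨o, ho, hcond⟩ := List.any_eq_true.mp hpq
        refine Or.inr ⟨o, ho, ⟨Int.natCast_nonneg p, by exact_mod_cast hpL⟩, ?_⟩
        simpa [PySem.List.pyGetD_natCast] using hcond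
      · rintro (hx | ⟨o, ho, ⟨hx0, hxL⟩, hcond⟩)
        · exact absurd hx List.not_mem_nil
        · refine ⟨x.toNat, ⟨⟨?_, ?_⟩, Int.toNat_of_nonneg hx0⟩⟩
          · omega
          · rw [List.any_eq_true]
            refine ⟨o, ho, ?_⟩
            have hx' : ((x.toNat : Nat) : Int) = x := Int.toNat_of_nonneg hx0
            rw [← hx', PySem.List.pyGetD_natCast, PySem.List.pyGetD_natCast] at hcond
            exact hcond
    have hsorted := PySem.List.sorted_eq_of_perm_of_pairwise_lt _ _ _ hperm hyspair
    refine Eq.trans ?_ (congrArg _ hsorted.symm)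
    rw [List.map_map]
    rw [List.filter_congr (fun a _ => pv_pred s rest a)]
    rw [show PySem.Dict.empty.items = ([] : List (Int × List String)) from rfl, List.nil_append]
    refine List.map_congr_left (fun a ha => ?_)
    simp [List.map_map, Function.comp, PySem.List.pyGetD_natCast]

-- ===== VERDICT (by name: the statement is the Claim_ definition above) =====
theorem create_snps_dict_spec : Claim_equal_create_snps_dict := by
  intro fasta d _ _
  unfold Spec_create_snps_dict create_snps_dict create_snps_dict_alt
  exact pv_core _
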